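-- pv_equiv track=rewrite | github.com/CDE90/aoc-24 | d14/d14.py | count_robots_with_neighbors
-- ===== SOURCE A (Python) =====
-- def count_robots_with_neighbors(robots: list[tuple[int, int, int, int]]) -> int:
--     count = 0
--
--     positions: set[tuple[int, int]] = set()
--
--     for robot in robots:
--         positions.add((robot[0], robot[1]))
--
--     for robot in robots:
--         for dx in [-1, 0, 1]:
--             for dy in [-1, 0, 1]:
--                 new_x = robot[0] + dx
--                 new_y = robot[1] + dy
--                 if (new_x, new_y) in positions:
--                     count += 1
--
--     return count
-- ===== SOURCE B (Python) =====
-- def count_robots_with_neighbors(robots: list[tuple[int, int, int, int]]) -> int: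
--     # distinct occupied cells, first-occurrence order
--     distinct = list(dict.fromkeys((r[0], r[1]) for r in robots))
--     total = 0
--     for robot in robots:
--         x, y = robot[0], robot[1]
--         for px, py in distinct:
--             if abs(px - x) <= 1 and abs(py - y) <= 1:
--                 total += 1
--     return total
-- ===== Notes on version B (the rewrite author's own statement) =====
-- stated objective: alternative
-- what changed: B removes A's 3x3 offset enumeration and set lookups entirely: it dedups occupied cells once (dict.fromkeys) and, for each robot, counts distinct cells within Chebyshev distance 1 by direct pairwise abs-comparison; correct because the 9 neighbor offsets hit exactly the distinct cells of the Chebyshev-1 box.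
import Mathlib
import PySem

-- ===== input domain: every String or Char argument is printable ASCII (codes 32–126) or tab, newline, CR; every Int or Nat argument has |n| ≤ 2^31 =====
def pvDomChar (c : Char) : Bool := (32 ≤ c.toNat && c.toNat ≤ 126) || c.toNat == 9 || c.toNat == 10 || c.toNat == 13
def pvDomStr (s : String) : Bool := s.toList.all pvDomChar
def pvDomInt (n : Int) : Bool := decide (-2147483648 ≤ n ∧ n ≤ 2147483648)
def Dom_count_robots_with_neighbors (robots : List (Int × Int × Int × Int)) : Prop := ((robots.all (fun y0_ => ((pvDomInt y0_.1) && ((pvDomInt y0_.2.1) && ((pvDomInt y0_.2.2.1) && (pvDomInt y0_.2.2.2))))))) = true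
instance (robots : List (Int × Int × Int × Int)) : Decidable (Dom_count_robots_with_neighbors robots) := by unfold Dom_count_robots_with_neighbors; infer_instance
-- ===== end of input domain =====

-- B drops A's 3×3 neighbor-offset scan against a position set entirely: it dedups the occupied
-- cells once and, per robot, counts distinct cells within Chebyshev distance 1 by direct pairwise
-- comparison (objective: alternative — same answer, no set lookups and no offset enumeration).

-- ===== PORT A =====
def count_robots_with_neighbors (robots : List (Int × Int × Int × Int)) : Int :=
  let positions : PySem.Set (Int × Int) :=
    robots.foldl (fun s robot => PySem.Set.add s (robot.1, robot.2.1)) PySem.Set.empty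
  robots.foldl (fun count robot =>
    ([-1, 0, 1] : List Int).foldl (fun count dx =>
      ([-1, 0, 1] : List Int).foldl (fun count dy =>
        if PySem.Set.contains positions (robot.1 + dx, robot.2.1 + dy) then count + 1
        else count) count) count) 0

-- ===== PORT B =====
def count_robots_with_neighbors_alt (robots : List (Int × Int × Int × Int)) : Int :=
  let distinct : List (Int × Int) := PySem.List.dedup (robots.map (fun r => (r.1, r.2.1)))
  robots.foldl (fun total robot =>
    distinct.foldl (fun total p =>
      if |p.1 - robot.1| ≤ 1 ∧ |p.2 - robot.2.1| ≤ 1 then total + 1 else total) total) 0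

-- ===== PRECONDITION & SPEC =====
def Spec_count_robots_with_neighbors (robots : List (Int × Int × Int × Int)) (out : Int) : Prop := out = count_robots_with_neighbors_alt robots
instance (robots : List (Int × Int × Int × Int)) (out : Int) : Decidable (Spec_count_robots_with_neighbors robots out) := by unfold Spec_count_robots_with_neighbors; infer_instance

-- ===== CLAIM (what is proved, stated in full; the proofs are below) =====
def Claim_equal_count_robots_with_neighbors : Prop := ∀ (robots : List (Int × Int × Int × Int)), Dom_count_robots_with_neighbors robots → Spec_count_robots_with_neighbors robots (count_robots_with_neighbors robots)

-- ===== LEMMAS AND PROOFS =====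

-- The nine offsets of A's 3×3 scan, and the box of cells they reach around a center c.
def pvOffs : List (Int × Int) := [(-1,-1),(-1,0),(-1,1),(0,-1),(0,0),(0,1),(1,-1),(1,0),(1,1)]
def pvBox (c : Int × Int) : List (Int × Int) := pvOffs.map (fun d => (c.1 + d.1, c.2 + d.2))

lemma pvBox_nodup (c : Int × Int) : (pvBox c).Nodup := by
  apply List.Nodup.map
  · intro a b h
    have h1 := congrArg Prod.fst h
    have h2 := congrArg Prod.snd h
    simp at h1 h2
    exact Prod.ext (by omega) (by omega)
  · decide

lemma pvBox_mem (c p : Int × Int) : p ∈ pvBox c ↔ (|p.1 - c.1| ≤ 1 ∧ |p.2 - c.2| ≤ 1) := by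
  simp [pvBox, pvOffs, Prod.ext_iff, abs_le]
  omega

-- A's inner double loop counts the box cells whose test succeeds.
lemma pvA_inner (t : Int × Int → Bool) (c : Int × Int) (a : Int) :
    ([-1, 0, 1] : List Int).foldl (fun h dx =>
      ([-1, 0, 1] : List Int).foldl (fun h dy =>
        if t (c.1 + dx, c.2 + dy) then h + 1 else h) h) a
    = a + ((pvBox c).countP t : Int) := by
  simp only [PySem.List.foldl_if_add_one, PySem.List.foldl_add]
  simp only [pvBox, pvOffs, List.map_cons, List.map_nil, List.countP_cons, List.countP_nil,
    List.sum_cons, List.sum_nil]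
  push_cast
  split_ifs <;> ring

lemma pvCount_inter (u v : List (Int × Int)) (hu : u.Nodup) :
    u.countP (fun a => a ∈ v) = (u.toFinset ∩ v.toFinset).card := by
  rw [List.countP_eq_length_filter, ← List.toFinset_card_of_nodup (hu.filter _),
    List.toFinset_filter]
  congr 1
  ext a
  simp

-- counting the intersection of two duplicate-free lists is symmetric
lemma pvCount_comm (u v : List (Int × Int)) (hu : u.Nodup) (hv : v.Nodup) :
    u.countP (fun a => a ∈ v) = v.countP (fun a => a ∈ u) := by
  rw [pvCount_inter u v hu, pvCount_inter v u hv, Finset.inter_comm]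

-- per-robot agreement: box hits in P = distinct cells within Chebyshev distance 1
lemma pvPoint (P : List (Int × Int)) (c : Int × Int) :
    (pvBox c).countP (fun q => decide (q ∈ P))
      = (PySem.Set.ofList P).countP (fun p => decide (|p.1 - c.1| ≤ 1 ∧ |p.2 - c.2| ≤ 1)) := by
  have h1 : (pvBox c).countP (fun q => decide (q ∈ P))
      = (pvBox c).countP (fun q => decide (q ∈ PySem.Set.ofList P)) := by
    apply List.countP_congr
    intro q _
    simp [PySem.Set.mem_ofList]
  rw [h1, pvCount_comm _ _ (pvBox_nodup c) (PySem.Set.nodup_ofList P)]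
  apply List.countP_congr
  intro p _
  simp [pvBox_mem]

lemma pvMain_eq (robots : List (Int × Int × Int × Int)) :
    count_robots_with_neighbors robots = count_robots_with_neighbors_alt robots := by
  set P : List (Int × Int) := robots.map (fun r => (r.1, r.2.1)) with hP
  -- A side
  have hpos : robots.foldl (fun s robot => PySem.Set.add s (robot.1, robot.2.1)) PySem.Set.empty
      = PySem.Set.ofList P := by
    rw [PySem.Set.ofList_eq_foldl, hP, List.foldl_map]
    rfl
  have htA : ∀ q, PySem.Set.contains (PySem.Set.ofList P) q = decide (q ∈ P) := by
    intro q; simp [PySem.Set.contains, PySem.Set.mem_ofList]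
  have hA : count_robots_with_neighbors robots
      = (robots.map (fun r => ((pvBox (r.1, r.2.1)).countP (fun q => decide (q ∈ P)) : Int))).sum := by
    rw [count_robots_with_neighbors]
    simp only [hpos]
    rw [PySem.List.foldl_congr_mem robots _
      (fun (count : Int) (r : Int × Int × Int × Int) =>
        count + ((pvBox (r.1, r.2.1)).countP (fun q => decide (q ∈ P)) : Int)) 0
      (fun acc r _ => by
        dsimp only
        rw [← pvA_inner (fun q => decide (q ∈ P)) (r.1, r.2.1) acc]
        apply PySem.List.foldl_congr_mem
        intro a dx _
        apply PySem.List.foldl_congr_mem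
        intro b dy _
        rw [htA])]
    rw [PySem.List.foldl_add]
    simp
  -- B side
  have hB : count_robots_with_neighbors_alt robots
      = (robots.map (fun r => ((PySem.Set.ofList P).countP
          (fun p => decide (|p.1 - r.1| ≤ 1 ∧ |p.2 - r.2.1| ≤ 1)) : Int))).sum := by
    rw [count_robots_with_neighbors_alt]
    simp only [PySem.List.dedup_eq_ofList, ← hP]
    rw [PySem.List.foldl_congr_mem robots _
      (fun (total : Int) (r : Int × Int × Int × Int) =>
        total + ((PySem.Set.ofList P).countP
          (fun p => decide (|p.1 - r.1| ≤ 1 ∧ |p.2 - r.2.1| ≤ 1)) : Int)) 0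
      (fun acc r _ =>
        PySem.List.foldl_ite_add_one (fun (p : Int × Int) => |p.1 - r.1| ≤ 1 ∧ |p.2 - r.2.1| ≤ 1) _ acc)]
    rw [PySem.List.foldl_add]
    simp
  rw [hA, hB]
  congr 1
  apply List.map_congr_left
  intro r _
  simpa using congrArg (fun n : Nat => (n : Int)) (pvPoint P (r.1, r.2.1))

-- ===== VERDICT (by name: the statement is the Claim_ definition above) =====
theorem count_robots_with_neighbors_spec : Claim_equal_count_robots_with_neighbors := by
  intro robots _
  unfold Spec_count_robots_with_neighbors
  exact pvMain_eq robots
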